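-- pv_equiv track=rewrite | github.com/h1rak/super_set_bit | super_set_table.py | gen_comb_list_frozen
-- ===== SOURCE A (Python) =====
-- from itertools import combinations
--
-- def gen_comb_list_frozen(atom_list, n):
--     """
--     atom_listから全ての組み合わせを生成し、frozensetのリストを返す
--     :param atom_list: 元の要素リスト
--     :param n: 特定の組み合わせのサイズ (n=0 の場合、全てのサイズの組み合わせを生成)
--     :return: frozensetのリスト
--     """
--     comb_list = []
--     if n == 0:
--         for i in range(1, len(atom_list) + 1):
--             comb_list.extend(frozenset(tuple(comb)) for comb in combinations(atom_list, i))
--     else: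
--         comb_list.extend(frozenset(tuple(comb)) for comb in combinations(atom_list, n))
--     return comb_list
-- ===== SOURCE B (Python) =====
-- def _choose(atom_list, start, r):
--     """All r-element combinations of atom_list[start:], picked by ascending index,
--     in the same lexicographic order as itertools.combinations."""
--     if r == 0:
--         return [[]]
--     out = []
--     for i in range(start, len(atom_list) - r + 1):
--         for rest in _choose(atom_list, i + 1, r - 1):
--             out.append([atom_list[i]] + rest)
--     return out
--
-- def gen_comb_list_frozen(atom_list, n):
--     if n < 0:
--         raise ValueError("n must be non-negative")
--     sizes = range(1, len(atom_list) + 1) if n == 0 else [n]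
--     return [frozenset(c) for r in sizes for c in _choose(atom_list, 0, r)]
-- ===== Notes on version B (the rewrite author's own statement) =====
-- stated objective: alternative
-- what changed: Replaces the itertools.combinations library calls with a hand-written recursive enumerator that picks elements by ascending index (choose(start, r)), emitting combinations in the same lexicographic order and building the result with a single flat comprehension over the requested sizes.
import Mathlib
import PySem

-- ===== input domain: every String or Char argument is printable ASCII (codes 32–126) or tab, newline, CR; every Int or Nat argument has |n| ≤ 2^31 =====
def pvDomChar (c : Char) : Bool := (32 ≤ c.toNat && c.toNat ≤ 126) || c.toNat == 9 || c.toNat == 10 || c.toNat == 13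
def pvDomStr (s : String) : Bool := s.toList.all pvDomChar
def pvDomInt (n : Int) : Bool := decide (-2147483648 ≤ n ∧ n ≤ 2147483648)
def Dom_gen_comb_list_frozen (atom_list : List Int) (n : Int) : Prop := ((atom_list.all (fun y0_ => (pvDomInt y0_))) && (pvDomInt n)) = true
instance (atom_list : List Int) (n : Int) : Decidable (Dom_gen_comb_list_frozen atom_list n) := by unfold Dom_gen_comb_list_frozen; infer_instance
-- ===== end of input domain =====

-- B replaces the itertools.combinations library calls by a hand-written index-picking
-- recursive enumerator producing the same combinations in the same order (objective: alternative).

-- ===== PORT A =====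
-- itertools.combinations(xs, k) ported by hand as the standard head-split recursion:
-- combinations that contain the head, then those that do not — this yields exactly
-- itertools' lexicographic order of index tuples.
def pvCombA : List Int → Nat → List (List Int)
  | _, 0 => [[]]
  | [], _ + 1 => []
  | x :: xs, k + 1 => (pvCombA xs k).map (fun c => x :: c) ++ pvCombA xs (k + 1)

def gen_comb_list_frozen (atom_list : List Int) (n : Int) : List (List Int) :=
  let comb_list : List (List Int) := []
  if n == 0 then
    (PySem.List.pyRange 1 ((atom_list.length : Int) + 1) 1).foldl
      (fun acc i => acc ++ (pvCombA atom_list i.toNat).map (fun c => PySem.Set.ofList c)) comb_list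
  else
    comb_list ++ (pvCombA atom_list n.toNat).map (fun c => PySem.Set.ofList c)

-- ===== PORT B =====
-- _choose(atom_list, start, r): loop over i in range(start, len - r + 1) picking atom_list[i]
-- (always in range, so list.getD is exact) and recursing on (i+1, r-1).
def pvChooseB (atom_list : List Int) : Nat → Nat → List (List Int)
  | _, 0 => [[]]
  | start, r + 1 =>
    (List.range' start (atom_list.length - r - start)).foldl
      (fun acc i =>
        acc ++ (pvChooseB atom_list (i + 1) r).map (fun rest => atom_list.getD i 0 :: rest)) []

def gen_comb_list_frozen_alt (atom_list : List Int) (n : Int) : List (List Int) :=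
  let sizes : List Int :=
    if n == 0 then PySem.List.pyRange 1 ((atom_list.length : Int) + 1) 1 else [n]
  sizes.flatMap (fun r => (pvChooseB atom_list 0 r.toNat).map (fun c => PySem.Set.ofList c))

-- ===== PRECONDITION & SPEC =====
-- Pre_ excludes exactly n < 0, where A raises ValueError (itertools.combinations rejects a negative r).
def Pre_gen_comb_list_frozen (atom_list : List Int) (n : Int) : Prop := 0 ≤ n
instance (atom_list : List Int) (n : Int) : Decidable (Pre_gen_comb_list_frozen atom_list n) := by unfold Pre_gen_comb_list_frozen; infer_instance
def pvWitness_gen_comb_list_frozen : List Int × Int := ([1, 2, 3], 2)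

def Spec_gen_comb_list_frozen (atom_list : List Int) (n : Int) (out : List (List Int)) : Prop := out = gen_comb_list_frozen_alt atom_list n
instance (atom_list : List Int) (n : Int) (out : List (List Int)) : Decidable (Spec_gen_comb_list_frozen atom_list n out) := by unfold Spec_gen_comb_list_frozen; infer_instance

-- ===== CLAIM (what is proved, stated in full; the proofs are below) =====
def Claim_equal_gen_comb_list_frozen : Prop := ∀ (atom_list : List Int) (n : Int), Dom_gen_comb_list_frozen atom_list n → Pre_gen_comb_list_frozen atom_list n → Spec_gen_comb_list_frozen atom_list n (gen_comb_list_frozen atom_list n)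

-- ===== LEMMAS AND PROOFS =====

-- combinations of a too-short list are empty
theorem pvCombA_short : ∀ (xs : List Int) (k : Nat), xs.length < k → pvCombA xs k = [] := by
  intro xs
  induction xs with
  | nil => intro k hk; cases k with
    | zero => omega
    | succ k => rfl
  | cons x xs ih =>
    intro k hk
    cases k with
    | zero => omega
    | succ k =>
      simp only [pvCombA, ih k (by simpa using Nat.lt_of_succ_lt_succ hk),
        ih (k + 1) (by simp at hk ⊢; omega), List.map_nil, List.nil_append]

-- the index-picking enumerator on suffix `start` equals the head-split recursion on `drop start`
theorem pvChooseB_eq_combA (atom_list : List Int) :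
    ∀ (r start : Nat), pvChooseB atom_list start r = pvCombA (atom_list.drop start) r := by
  intro r
  induction r with
  | zero => intro start; simp [pvChooseB, pvCombA]
  | succ r ih =>
    intro start
    -- inner induction on the remaining length
    have key : ∀ (m : Nat) (start : Nat), m = atom_list.length - start →
        pvChooseB atom_list start (r + 1) = pvCombA (atom_list.drop start) (r + 1) := by
      intro m
      induction m with
      | zero =>
        intro start hm
        have hlen : atom_list.length ≤ start := by omega
        have hdrop : atom_list.drop start = [] := List.drop_eq_nil_of_le hlen
        have hcount : atom_list.length - r - start = 0 := by omega
        simp only [pvChooseB, hcount, List.range'_zero, List.foldl_nil, hdrop]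
        exact (pvCombA_short [] (r + 1) (by simp)).symm
      | succ m ihm =>
        intro start hm
        have hstart : start < atom_list.length := by omega
        by_cases hfit : start + r < atom_list.length
        · -- at least one index in the loop range
          have hcount : atom_list.length - r - start = (atom_list.length - r - (start + 1)) + 1 := by omega
          have hdrop : atom_list.drop start = atom_list[start] :: atom_list.drop (start + 1) :=
            List.drop_eq_getElem_cons hstart
          have hfold := PySem.List.foldl_append_eq_flatMap
            (l := List.range' start (atom_list.length - r - start))
            (g := fun i => (pvChooseB atom_list (i + 1) r).map (fun rest => atom_list.getD i 0 :: rest))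
            (acc := [])
          have hrange : List.range' start (atom_list.length - r - start)
              = start :: List.range' (start + 1) (atom_list.length - r - (start + 1)) := by
            rw [hcount]; rfl
          have hrec : pvChooseB atom_list (start + 1) (r + 1)
              = pvCombA (atom_list.drop (start + 1)) (r + 1) := ihm (start + 1) (by omega)
          have hfold' := PySem.List.foldl_append_eq_flatMap
            (l := List.range' (start + 1) (atom_list.length - r - (start + 1)))
            (g := fun i => (pvChooseB atom_list (i + 1) r).map (fun rest => atom_list.getD i 0 :: rest))
            (acc := [])
          calc pvChooseB atom_list start (r + 1)
              = (List.range' start (atom_list.length - r - start)).flatMap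
                  (fun i => (pvChooseB atom_list (i + 1) r).map (fun rest => atom_list.getD i 0 :: rest)) := by
                simp only [pvChooseB]; rw [hfold]; simp
            _ = (pvChooseB atom_list (start + 1) r).map (fun rest => atom_list.getD start 0 :: rest)
                  ++ (List.range' (start + 1) (atom_list.length - r - (start + 1))).flatMap
                      (fun i => (pvChooseB atom_list (i + 1) r).map (fun rest => atom_list.getD i 0 :: rest)) := by
                rw [hrange]; simp [List.flatMap_cons]
            _ = (pvCombA (atom_list.drop (start + 1)) r).map (fun rest => atom_list[start] :: rest)
                  ++ pvCombA (atom_list.drop (start + 1)) (r + 1) := by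
                rw [ih (start + 1), List.getD_eq_getElem atom_list 0 hstart]
                congr 1
                rw [← hrec]
                simp only [pvChooseB]
                rw [hfold']
                simp
            _ = pvCombA (atom_list.drop start) (r + 1) := by
                rw [hdrop]; rfl
        · -- loop range empty: suffix too short for r+1 elements
          have hcount : atom_list.length - r - start = 0 := by omega
          have hshort : (atom_list.drop start).length < r + 1 := by
            simp [List.length_drop]; omega
          simp only [pvChooseB, hcount, List.range'_zero, List.foldl_nil]
          exact (pvCombA_short _ _ hshort).symm
    exact key (atom_list.length - start) start rfl

-- ===== VERDICT (by name: the statement is the Claim_ definition above) =====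
theorem gen_comb_list_frozen_spec : Claim_equal_gen_comb_list_frozen := by
  intro atom_list n _hdom _hpre
  unfold Spec_gen_comb_list_frozen gen_comb_list_frozen gen_comb_list_frozen_alt
  by_cases h0 : n = 0
  · subst h0
    simp only [beq_self_eq_true, if_pos]
    rw [PySem.List.foldl_append_eq_flatMap]
    simp [pvChooseB_eq_combA]
  · simp only [beq_iff_eq, if_neg h0]
    simp [pvChooseB_eq_combA]
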